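-- pv_equiv track=rewrite | github.com/cn-asc/ascend-performance-updates | analysis_agent.py | _limit_section_words
-- ===== SOURCE A (Python) =====
-- def _limit_section_words(bullet_lines, max_words):
--     """
--     Limit a section's bullet points to not exceed max_words.
--     Prioritizes earlier bullets (assumed to be more important).
--     """
--     total_words = sum(len(line.split()) for line in bullet_lines)
--
--     if total_words <= max_words:
--         return bullet_lines
--
--     # Count words per bullet and prioritize
--     bullet_word_counts = [(i, len(line.split())) for i, line in enumerate(bullet_lines)]
--     bullet_word_counts.sort(key=lambda x: x[0])  # Keep original order
--
--     result_lines = []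
--     current_words = 0
--
--     for i, word_count in bullet_word_counts:
--         if current_words + word_count <= max_words:
--             result_lines.append(bullet_lines[i])
--             current_words += word_count
--         else:
--             # Try to fit partial bullet if possible
--             remaining_words = max_words - current_words
--             if remaining_words > 10:  # Only truncate if meaningful space remains
--                 words = bullet_lines[i].split()
--                 truncated = ' '.join(words[:remaining_words]) + '...'
--                 result_lines.append(truncated)
--             break
--
--     return result_lines
-- ===== SOURCE B (Python) =====
-- def _take_within(lines, budget):
--     """Divide and conquer: if the left half fits wholly in the budget, keep it
--     and recurse on the right half with the reduced budget; otherwise the cut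
--     falls inside the left half, so the right half is dropped and we recurse on
--     the left half only.  Depth is O(log n)."""
--     if not lines:
--         return []
--     if len(lines) == 1:
--         words = lines[0].split()
--         if len(words) <= budget:
--             return [lines[0]]
--         if budget > 10:
--             return [' '.join(words[:budget]) + '...']
--         return []
--     mid = len(lines) // 2
--     left = lines[:mid]
--     used = sum(len(line.split()) for line in left)
--     if used <= budget:
--         return left + _take_within(lines[mid:], budget - used)
--     return _take_within(left, budget)
--
--
-- def _limit_section_words(bullet_lines, max_words):
--     if sum(len(line.split()) for line in bullet_lines) <= max_words:
--         return bullet_lines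
--     return _take_within(bullet_lines, max_words)
-- ===== Notes on version B (the rewrite author's own statement) =====
-- stated objective: alternative
-- what changed: Replaces A's enumerate-then-sort-then-linear-greedy loop (with a per-iteration indexed lookup) by a recursive divide-and-conquer: split the list in half, keep the left half wholly if its word count fits the budget and recurse on the right with the reduced budget, otherwise drop the right half and recurse on the left.
import Mathlib
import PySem

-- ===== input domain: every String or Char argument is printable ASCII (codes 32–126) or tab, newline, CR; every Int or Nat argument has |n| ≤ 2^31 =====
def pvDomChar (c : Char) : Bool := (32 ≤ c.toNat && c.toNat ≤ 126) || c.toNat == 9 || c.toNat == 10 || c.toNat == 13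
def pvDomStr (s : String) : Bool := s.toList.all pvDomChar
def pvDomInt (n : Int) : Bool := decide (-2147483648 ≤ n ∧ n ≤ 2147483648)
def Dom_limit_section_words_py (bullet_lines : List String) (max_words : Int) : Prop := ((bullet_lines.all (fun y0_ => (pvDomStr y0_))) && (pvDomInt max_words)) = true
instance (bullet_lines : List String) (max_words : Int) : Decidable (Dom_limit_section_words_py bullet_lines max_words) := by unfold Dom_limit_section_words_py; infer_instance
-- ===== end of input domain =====

-- B replaces A's enumerate/sort/linear greedy loop by a recursive divide-and-conquer
-- over halves of the list (objective: alternative decomposition, similar cost).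

-- ===== PORT A =====
-- the for-loop over the sorted (index, word_count) pairs, with its early 'break'
def pvALoop (bullet_lines : List String) (max_words : Int) :
    List (Int × Int) → List String → Int → List String
  | [], result_lines, _ => result_lines
  | (i, word_count) :: rest, result_lines, current_words =>
    if current_words + word_count ≤ max_words then
      pvALoop bullet_lines max_words rest
        (result_lines ++ [PySem.List.pyGetD bullet_lines i ""]) (current_words + word_count)
    else
      let remaining_words := max_words - current_words
      if remaining_words > 10 then
        result_lines ++
          [PySem.Str.join " "
              (PySem.List.slice (PySem.Str.split₀ (PySem.List.pyGetD bullet_lines i ""))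
                none (some remaining_words)) ++ "..."]
      else result_lines

def limit_section_words_py (bullet_lines : List String) (max_words : Int) : List String :=
  let total_words : Int :=
    (bullet_lines.map (fun line => ((PySem.Str.split₀ line).length : Int))).sum
  if total_words ≤ max_words then bullet_lines
  else
    let bullet_word_counts :=
      (PySem.List.enumerate bullet_lines).map
        (fun p => (p.1, ((PySem.Str.split₀ p.2).length : Int)))
    let bullet_word_counts := PySem.List.sorted bullet_word_counts (fun x => x.1) false
    pvALoop bullet_lines max_words bullet_word_counts [] 0

-- ===== PORT B =====
-- sum of per-line word counts (B's 'sum(len(line.split()) for line in …)')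
def pvSumCounts (l : List String) : Int :=
  (l.map (fun line => ((PySem.Str.split₀ line).length : Int))).sum

-- B's _take_within: divide and conquer on halves of the list
def pvTakeWithin : List String → Int → List String
  | [], _ => []
  | [line], budget =>
    let words := PySem.Str.split₀ line
    if (words.length : Int) ≤ budget then [line]
    else if budget > 10 then
      [PySem.Str.join " " (PySem.List.slice words none (some budget)) ++ "..."]
    else []
  | l₀ :: l₁ :: rest, budget =>
    let lines := l₀ :: l₁ :: rest
    let mid := lines.length / 2
    let left := lines.take mid
    let used := pvSumCounts left
    if used ≤ budget then left ++ pvTakeWithin (lines.drop mid) (budget - used)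
    else pvTakeWithin left budget
termination_by lines _ => lines.length
decreasing_by
  · simp; omega
  · simp; omega

def limit_section_words_py_alt (bullet_lines : List String) (max_words : Int) : List String :=
  if pvSumCounts bullet_lines ≤ max_words then bullet_lines
  else pvTakeWithin bullet_lines max_words

-- ===== PRECONDITION & SPEC =====
def Spec_limit_section_words_py (bullet_lines : List String) (max_words : Int) (out : List String) : Prop := out = limit_section_words_py_alt bullet_lines max_words
instance (bullet_lines : List String) (max_words : Int) (out : List String) : Decidable (Spec_limit_section_words_py bullet_lines max_words out) := by unfold Spec_limit_section_words_py; infer_instance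

-- ===== CLAIM (what is proved, stated in full; the proofs are below) =====
def Claim_equal_limit_section_words_py : Prop := ∀ (bullet_lines : List String) (max_words : Int), Dom_limit_section_words_py bullet_lines max_words → Spec_limit_section_words_py bullet_lines max_words (limit_section_words_py bullet_lines max_words)

-- ===== LEMMAS AND PROOFS =====

-- linear greedy: common reference value of A's loop and B's divide-and-conquer
def pvTake : List String → Int → List String
  | [], _ => []
  | line :: rest, budget =>
    let n : Int := ((PySem.Str.split₀ line).length : Int)
    if n ≤ budget then line :: pvTake rest (budget - n)
    else if budget > 10 then
      [PySem.Str.join " " (PySem.List.slice (PySem.Str.split₀ line) none (some budget)) ++ "..."]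
    else []

theorem pv_enum_fst_ge : ∀ (xs : List String) (s : Int) (p : Int × String),
    p ∈ PySem.List.enumerate xs s → s ≤ p.1 := by
  intro xs
  induction xs with
  | nil => intro s p hp; simp [PySem.List.enumerate_nil] at hp
  | cons x xs ih =>
    intro s p hp
    rw [PySem.List.enumerate_cons] at hp
    rcases List.mem_cons.mp hp with hp | hp
    · simp [hp]
    · have := ih (s + 1) p hp; omega

theorem pv_enum_pairwise (xs : List String) (s : Int) :
    (PySem.List.enumerate xs s).Pairwise (fun a b => a.1 ≤ b.1) := by
  induction xs generalizing s with
  | nil => simp [PySem.List.enumerate_nil]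
  | cons x xs ih =>
    rw [PySem.List.enumerate_cons]
    refine List.Pairwise.cons ?_ (ih (s + 1))
    intro p hp
    have := pv_enum_fst_ge xs (s + 1) p hp
    simp; omega

theorem pv_getD_of_drop {full : List String} {j : Nat} {line : String} {rest : List String}
    (h : full.drop j = line :: rest) :
    PySem.List.pyGetD full (j : Int) "" = line := by
  have h1 : (full.drop j)[0]? = some line := by rw [h]; rfl
  rw [List.getElem?_drop] at h1
  simp only [Nat.add_zero] at h1
  rw [PySem.List.pyGetD_natCast]
  simp [List.getD, h1]

-- A's loop over the enumerated suffix equals the linear greedy pvTake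
theorem pv_aLoop_eq : ∀ (suf : List String) (j : Nat) (full : List String)
    (mw cur : Int) (res : List String), full.drop j = suf →
    pvALoop full mw
      ((PySem.List.enumerate suf (j : Int)).map
        (fun p => (p.1, ((PySem.Str.split₀ p.2).length : Int)))) res cur
      = res ++ pvTake suf (mw - cur) := by
  intro suf
  induction suf with
  | nil => intro j full mw cur res _; simp [PySem.List.enumerate_nil, pvALoop, pvTake]
  | cons line rest ih =>
    intro j full mw cur res hdrop
    rw [PySem.List.enumerate_cons]
    simp only [List.map_cons, pvALoop, pvTake]
    have hline := pv_getD_of_drop hdrop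
    have hdrop' : full.drop (j + 1) = rest := by
      have : full.drop (j + 1) = (full.drop j).drop 1 := by rw [List.drop_drop]
      rw [this, hdrop]; rfl
    by_cases hc : cur + ((PySem.Str.split₀ line).length : Int) ≤ mw
    · rw [if_pos hc, if_pos (show ((PySem.Str.split₀ line).length : Int) ≤ mw - cur by omega)]
      have hcast : (j : Int) + 1 = ((j + 1 : Nat) : Int) := by push_cast; ring
      rw [hcast, ih (j + 1) full mw (cur + ((PySem.Str.split₀ line).length : Int))
            (res ++ [PySem.List.pyGetD full (j : Int) ""]) hdrop', hline]
      have : mw - (cur + ((PySem.Str.split₀ line).length : Int))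
           = mw - cur - ((PySem.Str.split₀ line).length : Int) := by ring
      rw [this]
      simp
    · rw [if_neg hc, if_neg (show ¬ ((PySem.Str.split₀ line).length : Int) ≤ mw - cur by omega)]
      by_cases hr : mw - cur > 10
      · rw [if_pos hr, if_pos hr, hline]
      · rw [if_neg hr, if_neg hr]; simp

theorem pv_sorted_enum (bullet_lines : List String) :
    PySem.List.sorted
      ((PySem.List.enumerate bullet_lines).map
        (fun p => (p.1, ((PySem.Str.split₀ p.2).length : Int))))
      (fun x => x.1) false
    = (PySem.List.enumerate bullet_lines).map
        (fun p => (p.1, ((PySem.Str.split₀ p.2).length : Int))) := by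
  apply PySem.List.sorted_eq_self_of_pairwise
  exact (pv_enum_pairwise bullet_lines 0).map _ (fun a b h => h)

theorem pv_sumCounts_nonneg (l : List String) : 0 ≤ pvSumCounts l := by
  induction l with
  | nil => simp [pvSumCounts]
  | cons x xs ih =>
    simp only [pvSumCounts, List.map_cons, List.sum_cons] at *
    positivity

theorem pv_take_neg (l : List String) (b : Int) (hb : b < 0) : pvTake l b = [] := by
  cases l with
  | nil => rfl
  | cons x xs =>
    simp only [pvTake]
    have h0 : (0:Int) ≤ ((PySem.Str.split₀ x).length : Int) := Int.natCast_nonneg _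
    rw [if_neg (by omega), if_neg (by omega)]

-- left part fits: greedy takes it wholly
theorem pv_take_append_fits : ∀ (l r : List String) (b : Int), pvSumCounts l ≤ b →
    pvTake (l ++ r) b = l ++ pvTake r (b - pvSumCounts l) := by
  intro l
  induction l with
  | nil => intro r b _; simp [pvSumCounts]
  | cons x xs ih =>
    intro r b hb
    have hxs := pv_sumCounts_nonneg xs
    have hsum : pvSumCounts (x :: xs) = ((PySem.Str.split₀ x).length : Int) + pvSumCounts xs := by
      simp [pvSumCounts]
    rw [hsum] at hb
    simp only [List.cons_append, pvTake]
    rw [if_pos (by omega), ih r (b - ((PySem.Str.split₀ x).length : Int)) (by omega)]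
    rw [hsum]
    have : b - ((PySem.Str.split₀ x).length : Int) - pvSumCounts xs
         = b - (((PySem.Str.split₀ x).length : Int) + pvSumCounts xs) := by ring
    rw [this]

-- left part overflows: greedy never reaches the right part
theorem pv_take_append_cut : ∀ (l r : List String) (b : Int), b < pvSumCounts l →
    pvTake (l ++ r) b = pvTake l b := by
  intro l
  induction l with
  | nil =>
    intro r b hb
    simp only [pvSumCounts, List.map_nil, List.sum_nil] at hb
    simp only [List.nil_append]
    rw [pv_take_neg r b hb]; rfl
  | cons x xs ih =>
    intro r b hb
    have hsum : pvSumCounts (x :: xs) = ((PySem.Str.split₀ x).length : Int) + pvSumCounts xs := by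
      simp [pvSumCounts]
    rw [hsum] at hb
    simp only [List.cons_append, pvTake]
    by_cases hc : ((PySem.Str.split₀ x).length : Int) ≤ b
    · rw [if_pos hc, if_pos hc, ih r _ (by omega)]
    · rw [if_neg hc, if_neg hc]

-- B's divide-and-conquer equals the linear greedy
theorem pv_takeWithin_eq (lines : List String) (b : Int) :
    pvTakeWithin lines b = pvTake lines b := by
  induction hn : lines.length using Nat.strong_induction_on generalizing lines b with
  | _ n ih =>
    match lines with
    | [] => simp [pvTakeWithin, pvTake]
    | [line] => simp [pvTakeWithin, pvTake]
    | l₀ :: l₁ :: rest =>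
      have hlen : (l₀ :: l₁ :: rest).length = n := hn
      simp only [pvTakeWithin]
      set L := l₀ :: l₁ :: rest with hL
      have hlen2 : 2 ≤ L.length := by simp [hL]
      have hmid1 : 1 ≤ L.length / 2 := by omega
      have hmidlt : L.length / 2 < L.length := by omega
      have htd : L.take (L.length / 2) ++ L.drop (L.length / 2) = L := List.take_append_drop _ _
      by_cases hc : pvSumCounts (L.take (L.length / 2)) ≤ b
      · rw [if_pos hc]
        rw [ih (L.drop (L.length / 2)).length (by simp; omega) _ _ rfl]
        rw [← pv_take_append_fits _ _ _ hc, htd]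
      · rw [if_neg hc]
        rw [ih (L.take (L.length / 2)).length (by simp; omega) _ _ rfl]
        rw [← pv_take_append_cut (L.take (L.length / 2)) (L.drop (L.length / 2)) b (by omega), htd]

-- ===== VERDICT (by name: the statement is the Claim_ definition above) =====
theorem limit_section_words_py_spec : Claim_equal_limit_section_words_py := by
  intro bullet_lines max_words _
  unfold Spec_limit_section_words_py limit_section_words_py limit_section_words_py_alt
  by_cases h : pvSumCounts bullet_lines ≤ max_words
  · rw [if_pos h, if_pos (show (bullet_lines.map
        (fun line => ((PySem.Str.split₀ line).length : Int))).sum ≤ max_words from h)]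
  · rw [if_neg h, if_neg (show ¬ (bullet_lines.map
        (fun line => ((PySem.Str.split₀ line).length : Int))).sum ≤ max_words from h)]
    show pvALoop bullet_lines max_words
        (PySem.List.sorted ((PySem.List.enumerate bullet_lines).map
          (fun p => (p.1, ((PySem.Str.split₀ p.2).length : Int)))) (fun x => x.1) false)
        [] 0 = pvTakeWithin bullet_lines max_words
    rw [pv_sorted_enum, pv_takeWithin_eq]
    have hA := pv_aLoop_eq bullet_lines 0 bullet_lines max_words 0 [] rfl
    simp only [Nat.cast_zero, List.nil_append, sub_zero] at hA
    exact hA
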